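-- pv_equiv track=rewrite | github.com/graheetphartyal23/sentinelops-rl | train/grpo_training.py | trajectory_to_path
-- ===== SOURCE A (Python) =====
-- from typing import Any
--
-- def trajectory_to_path(env_trajectory: list[dict[str, Any]]) -> str:
--     """Convert trajectory actions to readable path visualization."""
--     if not env_trajectory:
--         return "(empty trajectory)"
--
--     labels: list[str] = []
--     has_written = False
--     for step in env_trajectory:
--         action = str(step.get("action", "unknown"))
--         if action == "read_data":
--             label = "read"
--         elif action == "write_data":
--             label = "write"
--             has_written = True
--         elif action == "analyze":
--             label = "validate" if has_written else "analyze"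
--         elif action == "call_api":
--             label = "call_api"
--         elif action == "decode_hint":
--             label = "decode_hint"
--         elif action == "submit":
--             label = "submit"
--         else:
--             label = action
--         labels.append(label)
--     return " -> ".join(labels)
-- ===== SOURCE B (Python) =====
-- _ACTION_MAP = {
--     "read_data": "read",
--     "write_data": "write",
--     "call_api": "call_api",
--     "decode_hint": "decode_hint",
--     "submit": "submit",
-- }
--
-- def trajectory_to_path(env_trajectory: list) -> str:
--     """Two-phase rewrite: precompute the first-write index, then map actions via a table."""
--     if not env_trajectory:
--         return "(empty trajectory)"
--     first_write = len(env_trajectory)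
--     for i, step in enumerate(env_trajectory):
--         if str(step.get("action", "unknown")) == "write_data":
--             first_write = i
--             break
--     labels = []
--     for i, step in enumerate(env_trajectory):
--         action = str(step.get("action", "unknown"))
--         if action == "analyze":
--             labels.append("validate" if i > first_write else "analyze")
--         else:
--             labels.append(_ACTION_MAP.get(action, action))
--     return " -> ".join(labels)
-- ===== Notes on version B (the rewrite author's own statement) =====
-- stated objective: alternative
-- what changed: Replaces A's single stateful loop carrying a has_written flag with a two-phase decomposition: one scan computes the index of the first write_data step, then a second stateless pass labels each action via a fixed lookup table, deciding analyze-vs-validate by comparing the position against that index.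
import Mathlib
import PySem

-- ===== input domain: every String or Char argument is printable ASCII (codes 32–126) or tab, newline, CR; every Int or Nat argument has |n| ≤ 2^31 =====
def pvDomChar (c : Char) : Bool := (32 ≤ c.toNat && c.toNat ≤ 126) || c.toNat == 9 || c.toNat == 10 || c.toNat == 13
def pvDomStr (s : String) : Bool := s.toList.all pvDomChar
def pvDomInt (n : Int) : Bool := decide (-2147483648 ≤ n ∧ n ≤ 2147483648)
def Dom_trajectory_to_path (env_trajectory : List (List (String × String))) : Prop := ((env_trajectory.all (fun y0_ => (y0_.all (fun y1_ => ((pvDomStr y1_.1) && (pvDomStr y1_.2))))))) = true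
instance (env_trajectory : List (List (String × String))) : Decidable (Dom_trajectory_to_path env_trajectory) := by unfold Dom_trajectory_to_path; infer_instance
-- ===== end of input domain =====

-- B replaces A's stateful has_written flag with a two-phase pass (first-write index precomputed,
-- then a table-driven labelling); alternative decomposition, same O(n) cost.


-- ===== PORT A =====
-- step.get("action", "unknown"): first-match lookup in the association list (exact for a Python dict)
def pvGetAction (step : List (String × String)) : String :=
  (((step.find? (fun kv => kv.1 == "action")).map (fun kv => kv.2)).getD "unknown")

-- the for-loop of A: state = has_written flag, emitting labels in order
def pvLoopA : List (List (String × String)) → Bool → List String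
  | [], _ => []
  | step :: rest, has_written =>
      let action := pvGetAction step
      if action == "read_data" then "read" :: pvLoopA rest has_written
      else if action == "write_data" then "write" :: pvLoopA rest true
      else if action == "analyze" then
        (if has_written then "validate" else "analyze") :: pvLoopA rest has_written
      else if action == "call_api" then "call_api" :: pvLoopA rest has_written
      else if action == "decode_hint" then "decode_hint" :: pvLoopA rest has_written
      else if action == "submit" then "submit" :: pvLoopA rest has_written
      else action :: pvLoopA rest has_written

def trajectory_to_path (env_trajectory : List (List (String × String))) : String :=
  if env_trajectory = [] then "(empty trajectory)"
  else PySem.Str.join " -> " (pvLoopA env_trajectory false)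

-- ===== PORT B =====
-- phase 1 of B: index of the first step whose action is "write_data" (length if none; the
-- enumerate-with-break loop as structural recursion)
def pvFirstWrite : List (List (String × String)) → Nat
  | [] => 0
  | step :: rest =>
      if pvGetAction step == "write_data" then 0 else 1 + pvFirstWrite rest

-- B's fixed lookup table _ACTION_MAP
def pvActionMap : PySem.Dict String String :=
  PySem.Dict.ofList [("read_data", "read"), ("write_data", "write"), ("call_api", "call_api"),
                     ("decode_hint", "decode_hint"), ("submit", "submit")]

-- phase 2 of B: stateless labelling pass with the running index i
def pvLoopB : List (List (String × String)) → Nat → Nat → List String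
  | [], _, _ => []
  | step :: rest, i, first_write =>
      let action := pvGetAction step
      (if action == "analyze" then (if first_write < i then "validate" else "analyze")
       else PySem.Dict.getD pvActionMap action action) :: pvLoopB rest (i + 1) first_write

def trajectory_to_path_alt (env_trajectory : List (List (String × String))) : String :=
  if env_trajectory = [] then "(empty trajectory)"
  else PySem.Str.join " -> " (pvLoopB env_trajectory 0 (pvFirstWrite env_trajectory))

-- ===== PRECONDITION & SPEC =====
def Spec_trajectory_to_path (env_trajectory : List (List (String × String))) (out : String) : Prop := out = trajectory_to_path_alt env_trajectory
instance (env_trajectory : List (List (String × String))) (out : String) : Decidable (Spec_trajectory_to_path env_trajectory out) := by unfold Spec_trajectory_to_path; infer_instance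

-- ===== CLAIM (what is proved, stated in full; the proofs are below) =====
def Claim_equal_trajectory_to_path : Prop := ∀ (env_trajectory : List (List (String × String))), Dom_trajectory_to_path env_trajectory → Spec_trajectory_to_path env_trajectory (trajectory_to_path env_trajectory)

-- ===== LEMMAS AND PROOFS =====

-- B's table lookup on each of the five known keys, and on an unknown key
theorem pvMap_read : PySem.Dict.getD pvActionMap "read_data" "read_data" = "read" := by decide
theorem pvMap_write : PySem.Dict.getD pvActionMap "write_data" "write_data" = "write" := by decide
theorem pvMap_call : PySem.Dict.getD pvActionMap "call_api" "call_api" = "call_api" := by decide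
theorem pvMap_decode : PySem.Dict.getD pvActionMap "decode_hint" "decode_hint" = "decode_hint" := by decide
theorem pvMap_submit : PySem.Dict.getD pvActionMap "submit" "submit" = "submit" := by decide
theorem pvMap_other (a : String) (h1 : a ≠ "read_data") (h2 : a ≠ "write_data")
    (h4 : a ≠ "call_api") (h5 : a ≠ "decode_hint") (h6 : a ≠ "submit") :
    PySem.Dict.getD pvActionMap a a = a := by
  have hm : pvActionMap = PySem.Dict.mk
      [("read_data", "read"), ("write_data", "write"), ("call_api", "call_api"),
       ("decode_hint", "decode_hint"), ("submit", "submit")] := by decide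
  rw [hm]
  simp [PySem.Dict.getD, Ne.symm h1, Ne.symm h2, Ne.symm h4, Ne.symm h5, Ne.symm h6,
        PySem.Dict.get?]

-- loop correspondence: A's flag at position i equals "first write index < i", provided the flag
-- is consistent with first_write and, while the flag is false, first_write points into the suffix
theorem pvLoopA_eq_pvLoopB (t : List (List (String × String))) (i first_write : Nat)
    (hw : Bool) (hflag : hw = decide (first_write < i))
    (hoff : hw = false → first_write = i + pvFirstWrite t) :
    pvLoopA t hw = pvLoopB t i first_write := by
  induction t generalizing i hw with
  | nil => simp [pvLoopA, pvLoopB]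
  | cons step rest ih =>
      simp only [pvLoopA, pvLoopB]
      by_cases hwd : pvGetAction step == "write_data"
      · -- this step is a write
        have hact : pvGetAction step = "write_data" := by simpa using hwd
        cases hw with
        | false =>
            have hfe : first_write = i := by
              have := hoff rfl
              simp [pvFirstWrite, hact] at this
              omega
            subst hfe
            simp [hact, pvMap_write, ih (first_write + 1) true (by simp) (by simp)]
        | true =>
            have hlt : first_write < i := by simpa using hflag.symm
            simp [hact, pvMap_write, ih (i + 1) true (by simp; omega) (by simp)]
      · -- not a write: the flag and the offset relation carry over
        have hflag' : hw = decide (first_write < i + 1) := by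
          cases hw with
          | false =>
              have := hoff rfl
              simp [pvFirstWrite, hwd] at this
              simp; omega
          | true =>
              have : first_write < i := by simpa using hflag.symm
              simp; omega
        have hoff' : hw = false → first_write = (i + 1) + pvFirstWrite rest := by
          intro h
          have := hoff h
          simp [pvFirstWrite, hwd] at this
          omega
        have hrec := ih (i + 1) hw hflag' hoff'
        by_cases hrd : pvGetAction step == "read_data"
        · simp [hrec, pvMap_read, (by simpa using hrd : pvGetAction step = "read_data")]
        · by_cases han : pvGetAction step == "analyze"
          · have han' : pvGetAction step = "analyze" := by simpa using han
            have hv : (if hw then "validate" else "analyze")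
                 = (if first_write < i then "validate" else "analyze") := by
              subst hflag; by_cases h : first_write < i <;> simp [h]
            simp [han', hrec, hv]
          · have h1 : pvGetAction step ≠ "read_data" := by simpa using hrd
            have h2 : pvGetAction step ≠ "write_data" := by simpa using hwd
            have h3 : pvGetAction step ≠ "analyze" := by simpa using han
            by_cases hca : pvGetAction step == "call_api"
            · simp [hrec, pvMap_call, (by simpa using hca : pvGetAction step = "call_api")]
            · by_cases hdh : pvGetAction step == "decode_hint"
              · simp [hrec, pvMap_decode,
                       (by simpa using hdh : pvGetAction step = "decode_hint")]
              · by_cases hsu : pvGetAction step == "submit"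
                · simp [hrec, pvMap_submit,
                         (by simpa using hsu : pvGetAction step = "submit")]
                · have h4 : pvGetAction step ≠ "call_api" := by simpa using hca
                  have h5 : pvGetAction step ≠ "decode_hint" := by simpa using hdh
                  have h6 : pvGetAction step ≠ "submit" := by simpa using hsu
                  simp [h1, h2, h3, h4, h5, h6, hrec, pvMap_other _ h1 h2 h4 h5 h6]

-- ===== VERDICT (by name: the statement is the Claim_ definition above) =====
theorem trajectory_to_path_spec : Claim_equal_trajectory_to_path := by
  intro t _
  unfold Spec_trajectory_to_path trajectory_to_path trajectory_to_path_alt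
  by_cases h : t = []
  · simp [h]
  · simp [h, pvLoopA_eq_pvLoopB t 0 (pvFirstWrite t) false (by simp) (by simp)]
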